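-- pv_equiv track=rewrite | github.com/bigzeroo/ccsrch | ccsrch-python/ccsrch.py | find_credit_cards_in_text
-- ===== SOURCE A (Python) =====
-- def luhn_checksum(card_number):
--     def digits_of(n):
--         return [int(d) for d in str(n)]
--     digits = digits_of(card_number)
--     odd_digits = digits[-1::-2]
--     even_digits = digits[-2::-2]
--     checksum = sum(odd_digits)
--     for d in even_digits:
--         checksum += sum(digits_of(d * 2))
--     return checksum % 10 == 0
--
-- def is_visa(card_number):
--     return (len(card_number) == 13 or len(card_number) == 16) and card_number.startswith('4')
--
-- def is_mastercard(card_number):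
--     return len(card_number) == 16 and card_number[:2] in ['51', '52', '53', '54', '55']
--
-- def is_american_express(card_number):
--     return len(card_number) == 15 and card_number[:2] in ['34', '37']
--
-- def is_discover(card_number):
--     return len(card_number) == 16 and card_number.startswith('6011')
--
-- def detect_card_type(card_number):
--     if is_visa(card_number):
--         return "Visa"
--     elif is_mastercard(card_number):
--         return "MasterCard"
--     elif is_american_express(card_number):
--         return "American Express"
--     elif is_discover(card_number):
--         return "Discover"
--     else:
--         return None
--
-- def find_credit_cards_in_text(text):
--     valid_cards = {
--         "Visa": [],
--         "MasterCard": [],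
--         "American Express": [],
--         "Discover": []
--     }
--
--     current_digits = []
--     for char in text:
--         if char.isdigit():
--             current_digits.append(char)
--         else:
--             if 13 <= len(current_digits) <= 19:
--                 card_number = ''.join(current_digits)
--                 if luhn_checksum(card_number):
--                     card_type = detect_card_type(card_number)
--                     if card_type:
--                         valid_cards[card_type].append(card_number)
--             current_digits = []  # 重置
--
--     if 13 <= len(current_digits) <= 19:
--         card_number = ''.join(current_digits)
--         if luhn_checksum(card_number):
--             card_type = detect_card_type(card_number)
--             if card_type:
--                 valid_cards[card_type].append(card_number)
--
--     return valid_cards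
-- ===== SOURCE B (Python) =====
-- _DOUBLED = [0, 2, 4, 6, 8, 1, 3, 5, 7, 9]  # digit sum of 2*d for d in 0..9
--
--
-- def _digit_runs(text):
--     runs, i, n = [], 0, len(text)
--     while i < n:
--         if text[i].isdigit():
--             j = i
--             while j < n and text[j].isdigit():
--                 j += 1
--             runs.append(text[i:j])
--             i = j
--         else:
--             i += 1
--     return runs
--
--
-- def _luhn_valid(number):
--     total, double = 0, False
--     for ch in reversed(number):
--         d = int(ch)
--         total += _DOUBLED[d] if double else d
--         double = not double
--     return total % 10 == 0
--
--
-- def _card_type(number):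
--     n = len(number)
--     p2 = number[:2]
--     if n in (13, 16) and number[:1] == '4':
--         return "Visa"
--     if n == 16 and p2 in ('51', '52', '53', '54', '55'):
--         return "MasterCard"
--     if n == 15 and p2 in ('34', '37'):
--         return "American Express"
--     if n == 16 and number[:4] == '6011':
--         return "Discover"
--     return None
--
--
-- def find_credit_cards_in_text(text):
--     cards = {"Visa": [], "MasterCard": [], "American Express": [], "Discover": []}
--     for run in _digit_runs(text):
--         if 13 <= len(run) <= 19 and _luhn_valid(run):
--             t = _card_type(run)
--             if t is not None:
--                 cards[t].append(run)
--     return cards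
-- ===== Notes on version B (the rewrite author's own statement) =====
-- stated objective: alternative
-- what changed: A's per-character accumulator loop with a duplicated after-loop flush block is replaced by a two-pointer extraction of maximal digit runs, a single-pass Luhn check using a toggle and a precomputed doubled-digit table instead of two extended slices plus per-digit string re-parsing, and one card-type function replacing four helper predicates.
import Mathlib
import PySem

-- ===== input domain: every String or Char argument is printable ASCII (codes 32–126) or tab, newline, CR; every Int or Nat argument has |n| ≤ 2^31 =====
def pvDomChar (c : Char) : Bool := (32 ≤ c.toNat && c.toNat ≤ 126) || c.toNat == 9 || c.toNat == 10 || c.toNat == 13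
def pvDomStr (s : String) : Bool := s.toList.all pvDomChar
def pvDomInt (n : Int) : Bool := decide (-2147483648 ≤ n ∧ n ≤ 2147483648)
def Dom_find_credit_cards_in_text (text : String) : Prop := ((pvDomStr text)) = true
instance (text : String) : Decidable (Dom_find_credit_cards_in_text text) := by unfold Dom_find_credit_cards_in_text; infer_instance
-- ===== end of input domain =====

-- B replaces A's per-character accumulator loop (with its duplicated after-loop flush) by a
-- two-pointer extraction of maximal digit runs, a toggle-and-table Luhn check and a single
-- card-type function; same return value ('alternative' objective, no speed claim).

-- ===== PORT A =====
-- digits_of(n): [int(d) for d in str(n)] (argument is a string or an int already rendered via toChars)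
def pvDigitsOf (cs : List Char) : List Int :=
  cs.map (fun c => (PySem.Int.ofChars? [c]).getD 0)

def luhn_checksum (card_number : List Char) : Bool :=
  let digits := pvDigitsOf card_number
  let odd_digits := (PySem.List.slice? digits (some (-1)) none (-2)).getD []
  let even_digits := (PySem.List.slice? digits (some (-2)) none (-2)).getD []
  let checksum := odd_digits.sum
  let checksum := even_digits.foldl
    (fun acc d => acc + (pvDigitsOf (PySem.Int.toChars (d * 2))).sum) checksum
  PySem.Int.mod checksum 10 == 0

def is_visa (cn : List Char) : Bool :=
  (cn.length == 13 || cn.length == 16) && PySem.Chars.startswith cn ['4']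

def is_mastercard (cn : List Char) : Bool :=
  cn.length == 16 &&
    [['5','1'],['5','2'],['5','3'],['5','4'],['5','5']].contains (PySem.List.slice cn none (some 2))

def is_american_express (cn : List Char) : Bool :=
  cn.length == 15 && [['3','4'],['3','7']].contains (PySem.List.slice cn none (some 2))

def is_discover (cn : List Char) : Bool :=
  cn.length == 16 && PySem.Chars.startswith cn ['6','0','1','1']

def detect_card_type (cn : List Char) : Option String :=
  if is_visa cn then some "Visa"
  else if is_mastercard cn then some "MasterCard"
  else if is_american_express cn then some "American Express"
  else if is_discover cn then some "Discover"
  else none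

-- the block A writes twice: flush current_digits into valid_cards
def pvFlushA (d : PySem.Dict String (List String)) (cur : List Char) :
    PySem.Dict String (List String) :=
  if 13 ≤ cur.length ∧ cur.length ≤ 19 then
    if luhn_checksum cur then
      match detect_card_type cur with
      | some t => d.modify t [] (fun l => l ++ [String.ofList cur])
      | none => d
    else d
  else d

-- the body of A's for-loop over the characters of text
def pvStepA (st : PySem.Dict String (List String) × List Char) (ch : Char) :
    PySem.Dict String (List String) × List Char :=
  if PySem.Chars.isdigit ch then (st.1, st.2 ++ [ch])
  else (pvFlushA st.1 st.2, [])

def find_credit_cards_in_text (text : String) : List (String × List String) :=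
  let valid_cards : PySem.Dict String (List String) :=
    PySem.Dict.mk [("Visa", []), ("MasterCard", []), ("American Express", []), ("Discover", [])]
  let st := text.toList.foldl pvStepA (valid_cards, [])
  (pvFlushA st.1 st.2).items

-- ===== PORT B =====
-- digit sum of 2*d for d in 0..9
def pvDoubled : List Int := [0, 2, 4, 6, 8, 1, 3, 5, 7, 9]

-- Source B _digit_runs: two-pointer extraction of the maximal digit runs
def pvDigitRuns : List Char → List (List Char)
  | [] => []
  | c :: cs =>
    if PySem.Chars.isdigit c then
      (c :: cs.takeWhile PySem.Chars.isdigit) :: pvDigitRuns (cs.dropWhile PySem.Chars.isdigit)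
    else pvDigitRuns cs
termination_by cs => cs.length
decreasing_by
  · simp only [List.length_cons]
    exact Nat.lt_succ_of_le (List.length_dropWhile_le _ _)
  · simp

-- Source B _luhn_valid: one pass over the reversed digits with a doubling toggle
def pvLuhnValid (number : List Char) : Bool :=
  let r := number.reverse.foldl
    (fun (st : Int × Bool) ch =>
      let d := (PySem.Int.ofChars? [ch]).getD 0
      (st.1 + (if st.2 then (PySem.List.pyGet? pvDoubled d).getD 0 else d), !st.2))
    (0, false)
  PySem.Int.mod r.1 10 == 0

-- Source B _card_type
def pvCardType (number : List Char) : Option String :=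
  let n := number.length
  let p2 := PySem.List.slice number none (some 2)
  if (n == 13 || n == 16) && (PySem.List.slice number none (some 1) == ['4']) then some "Visa"
  else if n == 16 && [['5','1'],['5','2'],['5','3'],['5','4'],['5','5']].contains p2 then
    some "MasterCard"
  else if n == 15 && [['3','4'],['3','7']].contains p2 then some "American Express"
  else if n == 16 && (PySem.List.slice number none (some 4) == ['6','0','1','1']) then
    some "Discover"
  else none

-- the body of Source B's for-loop over the runs
def pvStepB (d : PySem.Dict String (List String)) (run : List Char) :
    PySem.Dict String (List String) :=
  if (13 ≤ run.length ∧ run.length ≤ 19) ∧ pvLuhnValid run = true then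
    match pvCardType run with
    | some t => d.modify t [] (fun l => l ++ [String.ofList run])
    | none => d
  else d

def find_credit_cards_in_text_alt (text : String) : List (String × List String) :=
  let cards : PySem.Dict String (List String) :=
    PySem.Dict.mk [("Visa", []), ("MasterCard", []), ("American Express", []), ("Discover", [])]
  ((pvDigitRuns text.toList).foldl pvStepB cards).items

-- ===== PRECONDITION & SPEC =====
def Spec_find_credit_cards_in_text (text : String) (out : List (String × List String)) : Prop := out = find_credit_cards_in_text_alt text
instance (text : String) (out : List (String × List String)) : Decidable (Spec_find_credit_cards_in_text text out) := by unfold Spec_find_credit_cards_in_text; infer_instance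

-- ===== CLAIM (what is proved, stated in full; the proofs are below) =====
def Claim_equal_find_credit_cards_in_text : Prop := ∀ (text : String), Dom_find_credit_cards_in_text text → Spec_find_credit_cards_in_text text (find_credit_cards_in_text text)

-- ===== LEMMAS AND PROOFS =====

-- int(c) for a single character, as both ports compute it
def pvVal (c : Char) : Int := (PySem.Int.ofChars? [c]).getD 0

-- elements at even / odd positions
def pvEvens {α : Type} : List α → List α
  | [] => []
  | [x] => [x]
  | x :: _ :: xs => x :: pvEvens xs

def pvOdds {α : Type} (xs : List α) : List α := pvEvens xs.tail

theorem pvEvens_nil {α : Type} : pvEvens ([] : List α) = [] := rfl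

theorem pvEvens_singleton {α : Type} (x : α) : pvEvens [x] = [x] := rfl

theorem pvEvens_cons2 {α : Type} (x y : α) (xs : List α) :
    pvEvens (x :: y :: xs) = x :: pvEvens xs := rfl

theorem pvEvens_cons {α : Type} (x : α) (xs : List α) :
    pvEvens (x :: xs) = x :: pvOdds xs := by
  cases xs <;> rfl

theorem pvOdds_cons {α : Type} (x : α) (xs : List α) : pvOdds (x :: xs) = pvEvens xs := rfl

theorem digit_char_cases (c : Char) (h : PySem.Chars.isdigit c = true) :
    c ∈ ['0','1','2','3','4','5','6','7','8','9'] := by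
  simp only [PySem.Chars.isdigit, Bool.and_eq_true, decide_eq_true_eq] at h
  obtain ⟨h1, h2⟩ := h
  have h1' : 48 ≤ c.toNat := by simpa [Char.le_def, UInt32.le_iff_toNat_le] using h1
  have h2' : c.toNat ≤ 57 := by simpa [Char.le_def, UInt32.le_iff_toNat_le] using h2
  have hc : c = Char.ofNat c.toNat := (Char.ofNat_toNat c).symm
  interval_cases hh : c.toNat <;> subst hc <;> decide

-- digit sum of the doubled digit = table lookup, for every digit character
theorem doubled_table (c : Char) (h : PySem.Chars.isdigit c = true) :
    (pvDigitsOf (PySem.Int.toChars (pvVal c * 2))).sum =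
      (PySem.List.pyGet? pvDoubled (pvVal c)).getD 0 := by
  have := digit_char_cases c h
  fin_cases this <;> decide

theorem pvEvens_map {α β : Type} (f : α → β) :
    ∀ l : List α, pvEvens (l.map f) = (pvEvens l).map f := by
  intro l
  induction l using pvEvens.induct with
  | case1 => simp [pvEvens_nil]
  | case2 x => simp [pvEvens_singleton]
  | case3 x y xs ih => simp [pvEvens_cons2, ih]

theorem pvOdds_map {α β : Type} (f : α → β) (l : List α) :
    pvOdds (l.map f) = (pvOdds l).map f := by
  cases l <;> simp [pvOdds, pvEvens_map, pvEvens_nil]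

theorem mem_of_mem_pvEvens {α : Type} (x : α) :
    ∀ l : List α, x ∈ pvEvens l → x ∈ l := by
  intro l
  induction l using pvEvens.induct with
  | case1 => simp [pvEvens_nil]
  | case2 y => simp [pvEvens_singleton]
  | case3 y z xs ih =>
    intro h
    rw [pvEvens_cons2] at h
    rcases List.mem_cons.mp h with h | h
    · simp [h]
    · simp [List.mem_cons]; right; right; exact ih h

theorem mem_of_mem_pvOdds {α : Type} (x : α) (l : List α) (h : x ∈ pvOdds l) : x ∈ l := by
  cases l with
  | nil => simp [pvOdds, pvEvens_nil] at h
  | cons y ys => exact List.mem_cons_of_mem _ (mem_of_mem_pvEvens x ys h)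

-- the even-index selector as a filterMap over range
theorem fm_even {α : Type} :
    ∀ r : List α,
      List.filterMap (fun k => r[2 * k]?) (List.range ((r.length + 1) / 2)) = pvEvens r := by
  intro r
  induction r using pvEvens.induct with
  | case1 => simp [pvEvens_nil]
  | case2 x => simp [pvEvens]
  | case3 x y xs ih =>
    have h2 : ((x :: y :: xs).length + 1) / 2 = (xs.length + 1) / 2 + 1 := by
      simp only [List.length_cons]; omega
    rw [h2, List.range_succ_eq_map, List.filterMap_cons, List.filterMap_map]
    have harg : ((fun k => (x :: y :: xs)[2 * k]?) ∘ Nat.succ) = (fun k => xs[2 * k]?) := by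
      funext k
      show (x :: y :: xs)[2 * (k + 1)]? = xs[2 * k]?
      have h3 : 2 * (k + 1) = 2 * k + 1 + 1 := by omega
      rw [h3]
      simp
    rw [harg, ih, pvEvens_cons2]
    simp

-- ===== slice characterizations =====
theorem slice_odd_cons (a : Int) (l : List Int) :
    PySem.List.slice? (a :: l) (some (-1)) none (-2) =
      some (List.filterMap (fun k : Nat => (a :: l)[((l.length : Int) + -2 * (k : Int)).toNat]?)
        (List.range ((l.length + 2) / 2))) := by
  have hsi : PySem.List.sliceIndices (a :: l).length (some (-1)) none (-2) =
      ((l.length : Int), -1, -2) := by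
    unfold PySem.List.sliceIndices; norm_num
  unfold PySem.List.slice?
  rw [if_neg (by norm_num), hsi]
  simp only []
  rw [if_neg (by norm_num), if_pos (by omega)]
  rw [show (((l.length : Int) - -1 + - -2 - 1) / - -2).toNat = (l.length + 2) / 2 from by
    norm_num; omega]

theorem slice_odd (ds : List Int) :
    (PySem.List.slice? ds (some (-1)) none (-2)).getD [] = pvEvens ds.reverse := by
  cases ds with
  | nil => decide
  | cons a l =>
    rw [slice_odd_cons, Option.getD_some, ← fm_even ((a :: l).reverse)]
    rw [show ((a :: l).reverse.length + 1) / 2 = (l.length + 2) / 2 from by simp; omega]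
    apply List.filterMap_congr
    intro k hk
    have hk' : 2 * k ≤ l.length := by
      have := List.mem_range.mp hk; omega
    have hrev : (a :: l).reverse[2 * k]? = (a :: l)[(a :: l).length - 1 - 2 * k]? :=
      List.getElem?_reverse (by simp; omega)
    rw [hrev]
    congr 1
    simp only [List.length_cons]
    omega

theorem slice_even_cons2 (a b : Int) (m : List Int) :
    PySem.List.slice? (a :: b :: m) (some (-2)) none (-2) =
      some (List.filterMap (fun k : Nat => (a :: b :: m)[((m.length : Int) + -2 * (k : Int)).toNat]?)
        (List.range ((m.length + 2) / 2))) := by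
  have hsi : PySem.List.sliceIndices (a :: b :: m).length (some (-2)) none (-2) =
      ((m.length : Int), -1, -2) := by
    unfold PySem.List.sliceIndices; norm_num; omega
  unfold PySem.List.slice?
  rw [if_neg (by norm_num), hsi]
  simp only []
  rw [if_neg (by norm_num), if_pos (by omega)]
  rw [show (((m.length : Int) - -1 + - -2 - 1) / - -2).toNat = (m.length + 2) / 2 from by
    norm_num; omega]

theorem slice_even (ds : List Int) :
    (PySem.List.slice? ds (some (-2)) none (-2)).getD [] = pvOdds ds.reverse := by
  match ds with
  | [] => decide
  | [a] =>
    have h : PySem.List.slice? [a] (some (-2)) none (-2) = some [] := rfl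
    rw [h]; rfl
  | a :: b :: m =>
    rw [slice_even_cons2, Option.getD_some]
    have htail : pvOdds ((a :: b :: m).reverse) = pvEvens ((a :: b :: m).reverse.tail) := rfl
    rw [htail, ← fm_even ((a :: b :: m).reverse.tail)]
    rw [show ((a :: b :: m).reverse.tail.length + 1) / 2 = (m.length + 2) / 2 from by
      simp; omega]
    apply List.filterMap_congr
    intro k hk
    have hk' : 2 * k ≤ m.length := by
      have := List.mem_range.mp hk; omega
    rw [List.getElem?_tail]
    have hrev : (a :: b :: m).reverse[2 * k + 1]? =
        (a :: b :: m)[(a :: b :: m).length - 1 - (2 * k + 1)]? :=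
      List.getElem?_reverse (by simp; omega)
    rw [hrev]
    congr 1
    simp only [List.length_cons]
    omega

-- ===== luhn equality =====
-- the doubling branch of Source B's loop body
def pvGG (c : Char) : Int := (PySem.List.pyGet? pvDoubled (pvVal c)).getD 0

theorem luhn_toggle_fold :
    ∀ (r : List Char) (t : Int) (b : Bool),
      (r.foldl
        (fun (st : Int × Bool) ch =>
          let d := (PySem.Int.ofChars? [ch]).getD 0
          (st.1 + (if st.2 then (PySem.List.pyGet? pvDoubled d).getD 0 else d), !st.2)) (t, b)).1 =
      t + ((pvEvens r).map (fun c => if b then pvGG c else pvVal c)).sum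
        + ((pvOdds r).map (fun c => if b then pvVal c else pvGG c)).sum := by
  intro r
  induction r with
  | nil => intro t b; simp [pvEvens_nil, pvOdds]
  | cons x xs ih =>
    intro t b
    simp only [List.foldl_cons, pvEvens_cons, pvOdds_cons]
    rw [ih]
    cases b <;> simp [pvGG, pvVal] <;> ring

theorem luhn_eq (cs : List Char) (h : cs.all PySem.Chars.isdigit) :
    luhn_checksum cs = pvLuhnValid cs := by
  unfold luhn_checksum pvLuhnValid
  simp only []
  rw [show pvDigitsOf cs = cs.map pvVal from rfl]
  rw [slice_odd, slice_even, ← List.map_reverse, pvEvens_map, pvOdds_map]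
  rw [PySem.List.foldl_add]
  rw [luhn_toggle_fold]
  simp only [Bool.false_eq_true, if_false]
  congr 2
  · ring_nf
    congr 1
    rw [List.map_map]
    apply congrArg List.sum
    apply List.map_congr_left
    intro c hc
    have hmem : c ∈ cs := List.mem_reverse.mp (mem_of_mem_pvOdds c _ hc)
    have hdig : PySem.Chars.isdigit c = true := by
      exact List.all_eq_true.mp h c hmem
    simpa [Function.comp, pvVal] using doubled_table c hdig

-- ===== card type equality =====
theorem startswith_take (cs p : List Char) :
    PySem.Chars.startswith cs p = (cs.take p.length == p) := by
  rw [Bool.eq_iff_iff, PySem.Chars.startswith_iff, beq_iff_eq]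
  constructor
  · intro h; exact (List.prefix_iff_eq_take.mp h).symm
  · intro h; exact List.prefix_iff_eq_take.mpr h.symm

theorem detect_eq (cs : List Char) : detect_card_type cs = pvCardType cs := by
  unfold detect_card_type pvCardType is_visa is_mastercard is_american_express is_discover
  simp only []
  rw [startswith_take cs ['4'], startswith_take cs ['6','0','1','1']]
  rw [show PySem.List.slice cs none (some 1) = cs.take 1 from by
    rw [PySem.List.slice_to cs (by norm_num)]; rfl]
  rw [show PySem.List.slice cs none (some 4) = cs.take 4 from by
    rw [PySem.List.slice_to cs (by norm_num)]; rfl]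
  rfl

-- ===== flush = stepB on digit runs =====
theorem flush_eq (d : PySem.Dict String (List String)) (cur : List Char)
    (h : cur.all PySem.Chars.isdigit) : pvFlushA d cur = pvStepB d cur := by
  unfold pvFlushA pvStepB
  rw [luhn_eq cur h, detect_eq cur]
  split_ifs with h1 h2 h3 h3 <;> simp_all

-- ===== the run decomposition =====
def pvRunsC : List Char → List Char → List (List Char)
  | cur, [] => [cur]
  | cur, c :: cs => if PySem.Chars.isdigit c then pvRunsC (cur ++ [c]) cs else cur :: pvRunsC [] cs

theorem stepB_nil (d : PySem.Dict String (List String)) : pvStepB d [] = d := by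
  simp [pvStepB]

theorem loopA_eq :
    ∀ (cs : List Char) (d : PySem.Dict String (List String)) (cur : List Char),
      cur.all PySem.Chars.isdigit →
      (let st := cs.foldl pvStepA (d, cur); pvFlushA st.1 st.2) =
        (pvRunsC cur cs).foldl pvStepB d := by
  intro cs
  induction cs with
  | nil => intro d cur h; simpa [pvRunsC] using flush_eq d cur h
  | cons c cs ih =>
    intro d cur h
    by_cases hd : PySem.Chars.isdigit c = true
    · have hcur : (cur ++ [c]).all PySem.Chars.isdigit = true := by simp_all
      have hstep : pvStepA (d, cur) c = (d, cur ++ [c]) := by simp [pvStepA, hd]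
      have hruns : pvRunsC cur (c :: cs) = pvRunsC (cur ++ [c]) cs := by simp [pvRunsC, hd]
      simp only [List.foldl_cons, hstep, hruns]
      exact ih d (cur ++ [c]) hcur
    · have hstep : pvStepA (d, cur) c = (pvFlushA d cur, []) := by simp [pvStepA, hd]
      have hruns : pvRunsC cur (c :: cs) = cur :: pvRunsC [] cs := by simp [pvRunsC, hd]
      simp only [List.foldl_cons, hstep, hruns]
      rw [ih (pvFlushA d cur) [] (by simp)]
      rw [flush_eq d cur h]

theorem runsC_fold :
    ∀ (cs cur : List Char) (d : PySem.Dict String (List String)),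
      (pvRunsC cur cs).foldl pvStepB d =
        (if cur.isEmpty then (pvDigitRuns cs).foldl pvStepB d
         else ((cur ++ cs.takeWhile PySem.Chars.isdigit) ::
            pvDigitRuns (cs.dropWhile PySem.Chars.isdigit)).foldl pvStepB d) := by
  intro cs
  induction cs with
  | nil =>
    intro cur d
    cases cur with
    | nil => simp [pvRunsC, pvDigitRuns, stepB_nil]
    | cons x xs => simp [pvRunsC, pvDigitRuns]  -- takeWhile/dropWhile of [] reduce
  | cons c cs ih =>
    intro cur d
    by_cases hd : PySem.Chars.isdigit c = true
    · have hruns : pvRunsC cur (c :: cs) = pvRunsC (cur ++ [c]) cs := by simp [pvRunsC, hd]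
      rw [hruns, ih (cur ++ [c]) d]
      have hne : (cur ++ [c]).isEmpty = false := by simp
      rw [hne]
      cases hcur : cur.isEmpty
      · simp only [if_false, Bool.false_eq_true]
        simp [hd]
      · have : cur = [] := by cases cur <;> simp_all
        subst this
        simp [pvDigitRuns, hd]
    · have hruns : pvRunsC cur (c :: cs) = cur :: pvRunsC [] cs := by simp [pvRunsC, hd]
      rw [hruns, List.foldl_cons, ih [] (pvStepB d cur)]
      simp only [List.isEmpty_nil, if_true]
      cases hcur : cur.isEmpty
      · simp only [if_false, Bool.false_eq_true]
        simp [pvDigitRuns, hd]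
      · have : cur = [] := by cases cur <;> simp_all
        subst this
        simp [pvDigitRuns, hd, stepB_nil]

-- ===== VERDICT (by name: the statement is the Claim_ definition above) =====
theorem find_credit_cards_in_text_spec : Claim_equal_find_credit_cards_in_text := by
  unfold Claim_equal_find_credit_cards_in_text
  intro text _
  unfold Spec_find_credit_cards_in_text
  unfold find_credit_cards_in_text find_credit_cards_in_text_alt
  have h := loopA_eq text.toList
    (PySem.Dict.mk [("Visa", []), ("MasterCard", []), ("American Express", []), ("Discover", [])])
    [] (by simp)
  simp only at h ⊢
  rw [h, runsC_fold]
  simp
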